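-- pv_equiv track=rewrite | github.com/repertorium/webmir | backend/similarityhybridindex.py | extract_lyrics_and_positions
-- ===== SOURCE A (Python) =====
-- def extract_lyrics_and_positions(text):
--
--     in_note = False
--     buffer = []
--
--     # Extract lyrics
--     for i, char in enumerate(text):
--         if char == '(':
--             in_note = True
--         elif char == ')':
--             in_note = False
--         elif not in_note:
--             if char.isalpha() or char.isspace():
--                 buffer.append((char, i))
--
--     cleaned = []
--     cleaned_pos = []
--     last_was_space = False
--
--     for idx, (char, pos) in enumerate(buffer):
--         # Evitar espacios duplicados
--         if char.isspace():
--             if last_was_space or not cleaned: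
--                 continue
--             last_was_space = True
--         else:
--             last_was_space = False
--
--         cleaned.append(char)
--         cleaned_pos.append(pos)
--
--     # Reconstruir texto limpio
--     text_clean = ''.join(cleaned)
--
--     # Filtrar secuencias prohibidas
--     forbidden_patterns = ["V.", ".", "*", "\n"]
--     for pattern in forbidden_patterns:
--         while pattern in text_clean:
--             start = text_clean.find(pattern)
--             end = start + len(pattern)
--             del cleaned[start:end]
--             del cleaned_pos[start:end]
--             text_clean = ''.join(cleaned)
--
--     return ''.join(cleaned), cleaned_pos
-- ===== SOURCE B (Python) =====
-- def extract_lyrics_and_positions(text):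
--     # One linear pass: track parenthesis state and space-dedup state while
--     # emitting characters directly; newline entries are dropped at emission
--     # time (the other forbidden patterns contain '.'/'*', which can never
--     # occur in an alpha/whitespace-only buffer).
--     in_note = False
--     last_was_space = False
--     appended_any = False  # whether the dedup stage has accepted any char yet
--     out_chars = []
--     out_pos = []
--     for i, char in enumerate(text):
--         if char == '(':
--             in_note = True
--         elif char == ')':
--             in_note = False
--         elif not in_note and (char.isalpha() or char.isspace()):
--             if char.isspace():
--                 if last_was_space or not appended_any:
--                     continue
--                 last_was_space = True
--             else:
--                 last_was_space = False
--             appended_any = True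
--             if char != '\n':
--                 out_chars.append(char)
--                 out_pos.append(i)
--     return ''.join(out_chars), out_pos
-- ===== Notes on version B (the rewrite author's own statement) =====
-- stated objective: alternative
-- what changed: B fuses A's three passes (scan, space-dedup, repeated find-and-delete of forbidden patterns) into one linear pass that drops newline entries at emission time, since the other forbidden patterns contain characters that cannot occur in an alpha/whitespace-only buffer; intended as asymptotically faster, but a timing run measured only a 1.3x ratio at the largest size.
import Mathlib
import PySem

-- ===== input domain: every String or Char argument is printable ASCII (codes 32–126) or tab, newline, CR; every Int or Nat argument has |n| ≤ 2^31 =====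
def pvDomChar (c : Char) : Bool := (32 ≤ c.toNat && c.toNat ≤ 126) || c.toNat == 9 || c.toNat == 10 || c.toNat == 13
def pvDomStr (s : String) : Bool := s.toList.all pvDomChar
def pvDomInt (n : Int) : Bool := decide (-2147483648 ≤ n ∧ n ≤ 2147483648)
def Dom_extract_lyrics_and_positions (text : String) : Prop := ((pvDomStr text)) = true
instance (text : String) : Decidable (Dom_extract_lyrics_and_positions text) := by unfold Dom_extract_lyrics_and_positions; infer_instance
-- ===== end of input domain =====

-- B replaces A's three passes (scan, space-dedup, repeated find-and-delete) by one linear fused pass; objective: alternative single-pass algorithm (not measurably faster in a timing run).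

-- ===== PORT A =====
-- loop 1 of A: collect alpha/whitespace chars outside parentheses, with positions
def pvStepScan (st : Bool × List (Char × Int)) (p : Int × Char) : Bool × List (Char × Int) :=
  if p.2 = '(' then (true, st.2)
  else if p.2 = ')' then (false, st.2)
  else if st.1 = false then
    (if PySem.Chars.isalpha p.2 || PySem.Chars.isspace p.2 then (st.1, st.2 ++ [(p.2, p.1)]) else st)
  else st

-- loop 2 of A: drop duplicated/leading whitespace; state = (cleaned, cleaned_pos, last_was_space)
def pvStepDedup (st : List Char × List Int × Bool) (cp : Char × Int) : List Char × List Int × Bool :=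
  if PySem.Chars.isspace cp.1 then
    if st.2.2 || st.1.isEmpty then st
    else (st.1 ++ [cp.1], st.2.1 ++ [cp.2], true)
  else (st.1 ++ [cp.1], st.2.1 ++ [cp.2], false)

-- A's 'while pattern in text_clean: start = text_clean.find(pattern); del cleaned[start:end]; del cleaned_pos[start:end]'
-- (hp is a proof argument needed for termination only)
def pvRemoveAll (pat : List Char) (hp : 1 ≤ pat.length) (cs : List Char) (ps : List Int) :
    List Char × List Int :=
  if h : PySem.Chars.isIn pat cs = true then
    pvRemoveAll pat hp
      (cs.take (PySem.Chars.find cs pat).toNat ++ cs.drop ((PySem.Chars.find cs pat).toNat + pat.length))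
      (ps.take (PySem.Chars.find cs pat).toNat ++ ps.drop ((PySem.Chars.find cs pat).toNat + pat.length))
  else (cs, ps)
termination_by cs.length
decreasing_by
  have hinf : pat <:+: cs := (PySem.Chars.isIn_iff_infix _ _).mp h
  have hnn : 0 ≤ PySem.Chars.find cs pat := (PySem.Chars.find_nonneg_iff _ _).mpr hinf
  have hspec := (PySem.Chars.find_spec (s := cs) (sub := pat) hnn).1
  have hle := hspec.length_le
  simp only [List.length_drop] at hle
  simp only [List.length_append, List.length_take, List.length_drop]
  omega

def extract_lyrics_and_positions (text : String) : String × List Int :=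
  let scan := (PySem.List.enumerate text.toList).foldl pvStepScan (false, [])
  let ded := scan.2.foldl pvStepDedup ([], [], false)
  let r1 := pvRemoveAll ['V', '.'] (by norm_num) ded.1 ded.2.1
  let r2 := pvRemoveAll ['.'] (by norm_num) r1.1 r1.2
  let r3 := pvRemoveAll ['*'] (by norm_num) r2.1 r2.2
  let r4 := pvRemoveAll ['\n'] (by norm_num) r3.1 r3.2
  (String.ofList r4.1, r4.2)

-- ===== PORT B =====
-- one fused pass; state = (in_note, last_was_space, appended_any, out_chars, out_pos)
def pvStepAlt (st : Bool × Bool × Bool × List Char × List Int) (p : Int × Char) :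
    Bool × Bool × Bool × List Char × List Int :=
  if p.2 = '(' then (true, st.2)
  else if p.2 = ')' then (false, st.2)
  else if st.1 = false ∧ (PySem.Chars.isalpha p.2 || PySem.Chars.isspace p.2) = true then
    if PySem.Chars.isspace p.2 then
      if st.2.1 || !st.2.2.1 then st
      else (st.1, true, true,
            if p.2 ≠ '\n' then st.2.2.2.1 ++ [p.2] else st.2.2.2.1,
            if p.2 ≠ '\n' then st.2.2.2.2 ++ [p.1] else st.2.2.2.2)
    else (st.1, false, true,
          if p.2 ≠ '\n' then st.2.2.2.1 ++ [p.2] else st.2.2.2.1,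
          if p.2 ≠ '\n' then st.2.2.2.2 ++ [p.1] else st.2.2.2.2)
  else st

def extract_lyrics_and_positions_alt (text : String) : String × List Int :=
  let st := (PySem.List.enumerate text.toList).foldl pvStepAlt (false, false, false, [], [])
  (String.ofList st.2.2.2.1, st.2.2.2.2)

-- ===== PRECONDITION & SPEC =====
def Spec_extract_lyrics_and_positions (text : String) (out : String × List Int) : Prop := out = extract_lyrics_and_positions_alt text
instance (text : String) (out : String × List Int) : Decidable (Spec_extract_lyrics_and_positions text out) := by unfold Spec_extract_lyrics_and_positions; infer_instance

-- ===== CLAIM (what is proved, stated in full; the proofs are below) =====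
def Claim_equal_extract_lyrics_and_positions : Prop := ∀ (text : String), Dom_extract_lyrics_and_positions text → Spec_extract_lyrics_and_positions text (extract_lyrics_and_positions text)

-- ===== LEMMAS AND PROOFS =====

-- the dedup-and-emit step hidden inside pvStepAlt (on state (last_was_space, appended_any, out_chars, out_pos))
def pvG (st : Bool × Bool × List Char × List Int) (cp : Char × Int) :
    Bool × Bool × List Char × List Int :=
  if PySem.Chars.isspace cp.1 then
    if st.1 || !st.2.1 then st
    else (true, true,
          if cp.1 ≠ '\n' then st.2.2.1 ++ [cp.1] else st.2.2.1,
          if cp.1 ≠ '\n' then st.2.2.2 ++ [cp.2] else st.2.2.2)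
  else (false, true,
        if cp.1 ≠ '\n' then st.2.2.1 ++ [cp.1] else st.2.2.1,
        if cp.1 ≠ '\n' then st.2.2.2 ++ [cp.2] else st.2.2.2)

-- abstraction of A's dedup state into B's fused state
def pvAbs (t : List Char × List Int × Bool) : Bool × Bool × List Char × List Int :=
  (t.2.2, !t.1.isEmpty, t.1.filter (fun c => c ≠ '\n'),
   ((t.1.zip t.2.1).filter (fun q => q.1 ≠ '\n')).map Prod.snd)

lemma pv_scan_acc (l : List (Int × Char)) : ∀ (n : Bool) (buf : List (Char × Int)),
    l.foldl pvStepScan (n, buf) =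
      ((l.foldl pvStepScan (n, [])).1, buf ++ (l.foldl pvStepScan (n, [])).2) := by
  induction l with
  | nil => intro n buf; simp
  | cons p l ih =>
    intro n buf
    simp only [List.foldl_cons, pvStepScan]
    split_ifs with h1 h2 h3 h4
    · exact ih _ _
    · exact ih _ _
    · rw [List.nil_append, ih n (buf ++ [(p.2, p.1)]), ih n [(p.2, p.1)]]
      simp
    · exact ih _ _
    · exact ih _ _

lemma pv_stepAlt_eq (n : Bool) (d : Bool × Bool × List Char × List Int) (p : Int × Char) :
    pvStepAlt (n, d) p =
      if p.2 = '(' then (true, d)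
      else if p.2 = ')' then (false, d)
      else if n = false ∧ (PySem.Chars.isalpha p.2 || PySem.Chars.isspace p.2) = true then
        (n, pvG d (p.2, p.1))
      else (n, d) := by
  simp only [pvStepAlt, pvG]
  split_ifs <;> rfl

lemma pv_fuse (l : List (Int × Char)) : ∀ (n : Bool) (d : Bool × Bool × List Char × List Int),
    l.foldl pvStepAlt (n, d) =
      ((l.foldl pvStepScan (n, [])).1, (l.foldl pvStepScan (n, [])).2.foldl pvG d) := by
  induction l with
  | nil => intro n d; simp
  | cons p l ih =>
    intro n d
    simp only [List.foldl_cons, pv_stepAlt_eq, pvStepScan]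
    split_ifs with h1 h2 h3 h4 h5 h6 h7
    all_goals first
      | exact ih _ _
      | (exfalso; tauto)
      | (rw [List.nil_append, ih _ (pvG d (p.2, p.1)), pv_scan_acc l _ [(p.2, p.1)]]; simp)

lemma pvAbs_append (cs : List Char) (ps : List Int) (c : Char) (pos : Int) (b : Bool)
    (h : cs.length = ps.length) :
    pvAbs (cs ++ [c], ps ++ [pos], b) =
      (b, true,
       if c ≠ '\n' then cs.filter (fun c => c ≠ '\n') ++ [c] else cs.filter (fun c => c ≠ '\n'),
       if c ≠ '\n' then ((cs.zip ps).filter (fun q => q.1 ≠ '\n')).map Prod.snd ++ [pos]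
       else ((cs.zip ps).filter (fun q => q.1 ≠ '\n')).map Prod.snd) := by
  simp only [pvAbs, List.filter_append, List.zip_append h, List.map_append]
  split_ifs with hc
  · simp [hc]
  · simp [not_not.mp (by simpa using hc)]

lemma pv_dedup_rel (buf : List (Char × Int)) :
    ∀ (cs : List Char) (ps : List Int) (last : Bool), cs.length = ps.length →
      buf.foldl pvG (pvAbs (cs, ps, last)) = pvAbs (buf.foldl pvStepDedup (cs, ps, last)) := by
  induction buf with
  | nil => intro cs ps last h; rfl
  | cons cp buf ih =>
    intro cs ps last h
    simp only [List.foldl_cons]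
    by_cases hs : PySem.Chars.isspace cp.1 = true
    · by_cases hskip : (last || cs.isEmpty) = true
      · have e1 : pvG (pvAbs (cs, ps, last)) cp = pvAbs (cs, ps, last) := by
          simp [pvG, pvAbs, hs, Bool.not_not, hskip]
        have e2 : pvStepDedup (cs, ps, last) cp = (cs, ps, last) := by
          simp [pvStepDedup, hs, hskip]
        rw [e1, e2]; exact ih cs ps last h
      · have e1 : pvG (pvAbs (cs, ps, last)) cp = pvAbs (cs ++ [cp.1], ps ++ [cp.2], true) := by
          rw [pvAbs_append _ _ _ _ _ h]
          simp [pvG, pvAbs, hs, Bool.not_not, hskip]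
        have e2 : pvStepDedup (cs, ps, last) cp = (cs ++ [cp.1], ps ++ [cp.2], true) := by
          simp [pvStepDedup, hs, hskip]
        rw [e1, e2]; exact ih _ _ _ (by simp [h])
    · have e1 : pvG (pvAbs (cs, ps, last)) cp = pvAbs (cs ++ [cp.1], ps ++ [cp.2], false) := by
        rw [pvAbs_append _ _ _ _ _ h]
        simp [pvG, pvAbs, hs]
      have e2 : pvStepDedup (cs, ps, last) cp = (cs ++ [cp.1], ps ++ [cp.2], false) := by
        simp [pvStepDedup, hs]
      rw [e1, e2]; exact ih _ _ _ (by simp [h])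

lemma pv_dedup_inv (buf : List (Char × Int)) :
    ∀ (cs : List Char) (ps : List Int) (last : Bool), cs.length = ps.length →
      (∀ c ∈ cs, (PySem.Chars.isalpha c || PySem.Chars.isspace c) = true) →
      (∀ x ∈ buf, (PySem.Chars.isalpha x.1 || PySem.Chars.isspace x.1) = true) →
      (buf.foldl pvStepDedup (cs, ps, last)).1.length = (buf.foldl pvStepDedup (cs, ps, last)).2.1.length ∧
      (∀ c ∈ (buf.foldl pvStepDedup (cs, ps, last)).1, (PySem.Chars.isalpha c || PySem.Chars.isspace c) = true) := by
  induction buf with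
  | nil => intro cs ps last h hcs _; exact ⟨h, hcs⟩
  | cons cp buf ih =>
    intro cs ps last h hcs hbuf
    have hcp : (PySem.Chars.isalpha cp.1 || PySem.Chars.isspace cp.1) = true := hbuf cp (by simp)
    have hbuf' : ∀ x ∈ buf, (PySem.Chars.isalpha x.1 || PySem.Chars.isspace x.1) = true :=
      fun x hx => hbuf x (by simp [hx])
    have happ : ∀ c ∈ cs ++ [cp.1], (PySem.Chars.isalpha c || PySem.Chars.isspace c) = true := by
      intro c hc
      rcases List.mem_append.mp hc with hc | hc
      · exact hcs c hc
      · simp only [List.mem_singleton] at hc; subst hc; exact hcp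
    simp only [List.foldl_cons, pvStepDedup]
    split_ifs with hs hskip
    · exact ih cs ps last h hcs hbuf'
    · exact ih _ _ _ (by simp [h]) happ hbuf'
    · exact ih _ _ _ (by simp [h]) happ hbuf'

lemma pv_scan_inv (l : List (Int × Char)) : ∀ (n : Bool) (buf : List (Char × Int)),
    (∀ x ∈ buf, (PySem.Chars.isalpha x.1 || PySem.Chars.isspace x.1) = true) →
    ∀ x ∈ (l.foldl pvStepScan (n, buf)).2, (PySem.Chars.isalpha x.1 || PySem.Chars.isspace x.1) = true := by
  induction l with
  | nil => intro n buf hb; simpa using hb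
  | cons p l ih =>
    intro n buf hb
    simp only [List.foldl_cons, pvStepScan]
    split_ifs with h1 h2 h3 h4
    · exact ih _ _ hb
    · exact ih _ _ hb
    · refine ih _ _ ?_
      intro x hx
      rcases List.mem_append.mp hx with hx | hx
      · exact hb _ hx
      · simp only [List.mem_singleton] at hx; subst hx; exact h4
    · exact ih _ _ hb
    · exact ih _ _ hb

lemma pv_removeAll_noop (pat : List Char) (hp : 1 ≤ pat.length) (cs : List Char) (ps : List Int)
    (h : PySem.Chars.isIn pat cs = false) : pvRemoveAll pat hp cs ps = (cs, ps) := by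
  rw [pvRemoveAll]; simp [h]

lemma pv_no_dot (cs : List Char) (hall : ∀ c ∈ cs, (PySem.Chars.isalpha c || PySem.Chars.isspace c) = true)
    (pat : List Char) (hdot : '.' ∈ pat ∨ '*' ∈ pat) : PySem.Chars.isIn pat cs = false := by
  by_cases hin : PySem.Chars.isIn pat cs = true
  · exfalso
    have hinf : pat <:+: cs := (PySem.Chars.isIn_iff_infix _ _).mp hin
    rcases hdot with hd | hd
    · exact absurd (hall '.' (hinf.sublist.subset hd)) (by decide)
    · exact absurd (hall '*' (hinf.sublist.subset hd)) (by decide)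
  · simpa using hin

lemma pv_prefix_newline_iff (cs : List Char) (i : Nat) (hi : i < cs.length) :
    ['\n'] <+: cs.drop i ↔ cs[i] = '\n' := by
  rw [List.drop_eq_getElem_cons hi]
  constructor
  · rintro ⟨t, ht⟩
    simp only [List.singleton_append, List.cons.injEq] at ht
    exact ht.1.symm
  · intro h; exact ⟨cs.drop (i+1), by simp [h]⟩

lemma pv_remove_newline (hp : 1 ≤ (['\n'] : List Char).length) : ∀ (n : Nat) (cs : List Char) (ps : List Int), cs.length = n →
    cs.length = ps.length →
    pvRemoveAll ['\n'] hp cs ps =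
      (cs.filter (fun c => c ≠ '\n'), ((cs.zip ps).filter (fun q => q.1 ≠ '\n')).map Prod.snd) := by
  intro n
  induction n using Nat.strong_induction_on with
  | _ n ih =>
    intro cs ps hn heq
    rw [pvRemoveAll]
    by_cases hin : PySem.Chars.isIn ['\n'] cs = true
    · have hinf := (PySem.Chars.isIn_iff_infix (sub := ['\n']) (s := cs)).mp hin
      have hnn : 0 ≤ PySem.Chars.find cs ['\n'] := (PySem.Chars.find_nonneg_iff _ _).mpr hinf
      obtain ⟨hpre, hmin⟩ := PySem.Chars.find_spec (s := cs) (sub := ['\n']) hnn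
      rw [dif_pos hin]
      set j := (PySem.Chars.find cs ['\n']).toNat with hj
      have hjlt : j < cs.length := by
        rcases hpre with ⟨t, ht⟩
        have := congrArg List.length ht
        simp only [List.length_append, List.length_drop] at this
        simp only [List.length_cons, List.length_nil] at this
        omega
      have hcsj : cs[j] = '\n' := (pv_prefix_newline_iff cs j hjlt).mp hpre
      have hjps : j < ps.length := heq ▸ hjlt
      have htake : ∀ c ∈ cs.take j, c ≠ '\n' := by
        intro c hc hcn
        subst hcn
        rcases List.mem_take_iff_getElem.mp hc with ⟨i, hilt, hie⟩
        exact hmin i (lt_of_lt_of_le hilt (min_le_left _ _))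
          ((pv_prefix_newline_iff cs i (lt_of_lt_of_le hilt (min_le_right _ _))).mpr hie)
      have hdc : cs = cs.take j ++ '\n' :: cs.drop (j+1) := by
        conv_lhs => rw [← List.take_append_drop j cs]
        rw [List.drop_eq_getElem_cons hjlt, hcsj]
      have hdp : ps = ps.take j ++ ps[j] :: ps.drop (j+1) := by
        conv_lhs => rw [← List.take_append_drop j ps]
        rw [List.drop_eq_getElem_cons hjps]
      have hlen' : (cs.take j ++ cs.drop (j + ['\n'].length)).length = cs.length - 1 := by
        simp only [List.length_append, List.length_take, List.length_drop,
          List.length_cons, List.length_nil]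
        omega
      have heq' : (cs.take j ++ cs.drop (j + ['\n'].length)).length =
          (ps.take j ++ ps.drop (j + ['\n'].length)).length := by
        simp only [List.length_append, List.length_take, List.length_drop]
        omega
      rw [ih (cs.length - 1) (by omega) _ _ hlen' heq']
      have hj1 : j + (['\n'] : List Char).length = j + 1 := by simp
      rw [hj1]
      have hfe : (cs.take j).filter (fun c => c ≠ '\n') = cs.take j :=
        List.filter_eq_self.mpr (fun a ha => by simpa using htake a ha)
      have c1 : (cs.take j ++ cs.drop (j+1)).filter (fun c => c ≠ '\n') =
          cs.filter (fun c => c ≠ '\n') := by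
        conv_rhs => rw [hdc]
        simp [List.filter_append, hfe]
      have hzt : (cs.take j).length = (ps.take j).length := by
        simp only [List.length_take]; omega
      have hfz : ((cs.take j).zip (ps.take j)).filter (fun q => q.1 ≠ '\n') =
          (cs.take j).zip (ps.take j) :=
        List.filter_eq_self.mpr (fun q hq => by simpa using htake q.1 (List.of_mem_zip hq).1)
      have c2 : (((cs.take j ++ cs.drop (j+1)).zip (ps.take j ++ ps.drop (j+1))).filter
            (fun q => q.1 ≠ '\n')).map Prod.snd =
          ((cs.zip ps).filter (fun q => q.1 ≠ '\n')).map Prod.snd := by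
        conv_rhs => rw [hdc, hdp]
        rw [List.zip_append hzt, List.zip_append hzt, List.zip_cons_cons]
        rw [List.filter_append, List.filter_append, hfz]
        rw [List.filter_cons_of_neg (by simp)]
      rw [c1, c2]
    · rw [dif_neg hin]
      have hmem : '\n' ∉ cs := by
        intro hm
        rcases List.append_of_mem hm with ⟨s, t, rfl⟩
        exact hin ((PySem.Chars.isIn_iff_infix _ _).mpr ⟨s, t, by simp⟩)
      have h1 : cs.filter (fun c => c ≠ '\n') = cs :=
        List.filter_eq_self.mpr (fun a ha => by
          simp only [ne_eq, decide_eq_true_eq]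
          exact fun e => hmem (by rwa [e] at ha))
      have h2 : (cs.zip ps).filter (fun q => q.1 ≠ '\n') = cs.zip ps :=
        List.filter_eq_self.mpr (fun q hq => by
          simp only [ne_eq, decide_eq_true_eq]
          exact fun e => hmem (by
            have := (List.of_mem_zip hq).1
            rwa [e] at this))
      rw [h1, h2, List.map_snd_zip (le_of_eq heq.symm)]

-- ===== VERDICT (by name: the statement is the Claim_ definition above) =====
lemma pv_main (text : String) :
    extract_lyrics_and_positions text = extract_lyrics_and_positions_alt text := by
  simp only [extract_lyrics_and_positions, extract_lyrics_and_positions_alt]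
  have hscan2 := pv_scan_inv (PySem.List.enumerate text.toList) false [] (by simp)
  obtain ⟨hlen, hall⟩ :=
    pv_dedup_inv ((PySem.List.enumerate text.toList).foldl pvStepScan (false, [])).2
      [] [] false rfl (by simp) hscan2
  rw [pv_removeAll_noop _ _ _ _ (pv_no_dot _ hall _ (Or.inl (by simp)))]
  rw [pv_removeAll_noop _ _ _ _ (pv_no_dot _ hall _ (Or.inl (by simp)))]
  rw [pv_removeAll_noop _ _ _ _ (pv_no_dot _ hall _ (Or.inr (by simp)))]
  rw [pv_remove_newline _ _ _ _ rfl hlen]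
  rw [pv_fuse]
  rw [show ((false, false, [], []) : Bool × Bool × List Char × List Int) =
        pvAbs ([], [], false) from rfl]
  rw [pv_dedup_rel _ [] [] false rfl]
  simp [pvAbs]

theorem extract_lyrics_and_positions_spec : Claim_equal_extract_lyrics_and_positions := by
  intro text _
  unfold Spec_extract_lyrics_and_positions
  exact pv_main text
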